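-- pv_equiv track=rewrite | github.com/sinseman44/clivet-BMS-integration | custom_components/clivet_bms/clivet/operations.py | __get_err_code
-- ===== SOURCE A (Python) =====
-- def __get_err_code(
--                     val:int) -> str:
--     ''' transform int value to Error code '''
--     err_code = {
--         **{str(i): f"E{chr(48 + i - 1)}" for i in range(1, 10)},  # 'E0' to 'E8'
--         "10": "E9", "11": "EA", "12": "EB", "13": "EC", "14": "ED", "15": "EE", "16": "EF",
--         "17": "EH", "18": "EL", "19": "EP",
--
--         **{str(i): f"P{chr(48 + i - 20)}" for i in range(20, 29)},  # 'P0' to 'P8'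
--         "29": "P9", "30": "PA", "31": "PB", "32": "PC", "33": "PD", "34": "PE", "35": "PF",
--         "36": "PH", "37": "PL", "38": "PP",
--
--         **{str(i): f"H{chr(48 + i - 39)}" for i in range(39, 48)},  # 'H0' to 'H8'
--         "48": "H9", "49": "HA", "50": "HB", "51": "HC", "52": "HD", "53": "HE", "54": "HF",
--         "55": "HH", "56": "HL", "57": "HP",
--
--         **{str(i): f"C{chr(48 + i - 58)}" for i in range(58, 67)},  # 'C0' to 'C8'
--         "67": "C9", "68": "CA", "69": "CB", "70": "CC", "71": "CD", "72": "CE", "73": "CF",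
--         "74": "CH", "75": "CL", "76": "CP",
--
--         **{str(i): f"L{chr(48 + i - 77)}" for i in range(77, 86)},  # 'L0' to 'L8'
--         "86": "L9", "87": "LA", "88": "LB", "89": "LC", "90": "LD", "91": "LE", "92": "LF",
--         "93": "LH", "94": "LL", "95": "LP",
--
--         **{str(i): f"B{chr(48 + i - 96)}" for i in range(96, 105)},  # 'B0' to 'B8'
--         "105": "B9", "106": "BA", "107": "BB", "108": "BC", "109": "BD", "110": "BE", "111": "BF",
--         "112": "BH", "113": "BL", "114": "BP"
--     }
--     return err_code.get(str(val), "None")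
-- ===== SOURCE B (Python) =====
-- def __get_err_code(
--                     val:int) -> str:
--     ''' transform int value to Error code '''
--     # closed form: codes come in groups of 19 per leading letter
--     if type(val) is int and 1 <= val <= 114:
--         q, r = divmod(val - 1, 19)
--         return "EPHCLB"[q] + "0123456789ABCDEFHLP"[r]
--     return "None"
-- ===== Notes on version B (the rewrite author's own statement) =====
-- stated objective: simpler
-- what changed: Replaces the large string-keyed literal dict (six comprehensions plus literal blocks, rebuilt on every call) with a closed-form arithmetic computation: the leading letter is indexed from "EPHCLB" by integer division of the offset by the group size and the suffix from "0123456789ABCDEFHLP" by the remainder, guarded by a genuine-int range check.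
import Mathlib
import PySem

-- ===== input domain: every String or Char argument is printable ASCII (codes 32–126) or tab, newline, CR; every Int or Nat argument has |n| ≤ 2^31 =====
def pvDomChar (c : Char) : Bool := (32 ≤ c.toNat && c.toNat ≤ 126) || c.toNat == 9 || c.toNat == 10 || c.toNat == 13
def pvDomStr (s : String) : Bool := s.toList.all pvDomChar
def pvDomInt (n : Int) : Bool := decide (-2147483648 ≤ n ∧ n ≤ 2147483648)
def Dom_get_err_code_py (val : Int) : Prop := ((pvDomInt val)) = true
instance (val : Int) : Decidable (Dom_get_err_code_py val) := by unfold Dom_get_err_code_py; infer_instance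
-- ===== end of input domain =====

-- B replaces A's per-call 114-entry dict with a closed-form arithmetic computation (objective: simpler).

-- ===== PORT A =====
-- f"E{chr(48 + i - 1)}" etc. ported by hand as a two-char string via Char.ofNat; exact since 0 ≤ 48+i-off ≤ 127 for every generated i.
def errEntry (letter : Char) (i off : Int) : String :=
  String.ofList [letter, Char.ofNat (48 + i - off).toNat]

def errDict : PySem.Dict String String :=
  let d := (PySem.List.pyRange 1 10 1).foldl
    (fun d i => d.insert (PySem.Int.toStr i) (errEntry 'E' i 1)) PySem.Dict.empty
  let d := (((((((((d.insert "10" "E9").insert "11" "EA").insert "12" "EB").insert "13" "EC").insert "14" "ED").insert "15" "EE").insert "16" "EF").insert "17" "EH").insert "18" "EL").insert "19" "EP"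
  let d := (PySem.List.pyRange 20 29 1).foldl
    (fun d i => d.insert (PySem.Int.toStr i) (errEntry 'P' i 20)) d
  let d := (((((((((d.insert "29" "P9").insert "30" "PA").insert "31" "PB").insert "32" "PC").insert "33" "PD").insert "34" "PE").insert "35" "PF").insert "36" "PH").insert "37" "PL").insert "38" "PP"
  let d := (PySem.List.pyRange 39 48 1).foldl
    (fun d i => d.insert (PySem.Int.toStr i) (errEntry 'H' i 39)) d
  let d := (((((((((d.insert "48" "H9").insert "49" "HA").insert "50" "HB").insert "51" "HC").insert "52" "HD").insert "53" "HE").insert "54" "HF").insert "55" "HH").insert "56" "HL").insert "57" "HP"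
  let d := (PySem.List.pyRange 58 67 1).foldl
    (fun d i => d.insert (PySem.Int.toStr i) (errEntry 'C' i 58)) d
  let d := (((((((((d.insert "67" "C9").insert "68" "CA").insert "69" "CB").insert "70" "CC").insert "71" "CD").insert "72" "CE").insert "73" "CF").insert "74" "CH").insert "75" "CL").insert "76" "CP"
  let d := (PySem.List.pyRange 77 86 1).foldl
    (fun d i => d.insert (PySem.Int.toStr i) (errEntry 'L' i 77)) d
  let d := (((((((((d.insert "86" "L9").insert "87" "LA").insert "88" "LB").insert "89" "LC").insert "90" "LD").insert "91" "LE").insert "92" "LF").insert "93" "LH").insert "94" "LL").insert "95" "LP"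
  let d := (PySem.List.pyRange 96 105 1).foldl
    (fun d i => d.insert (PySem.Int.toStr i) (errEntry 'B' i 96)) d
  (((((((((d.insert "105" "B9").insert "106" "BA").insert "107" "BB").insert "108" "BC").insert "109" "BD").insert "110" "BE").insert "111" "BF").insert "112" "BH").insert "113" "BL").insert "114" "BP"

def get_err_code_py (val : Int) : String :=
  errDict.getD (PySem.Int.toStr val) "None"

-- ===== PORT B =====
-- "EPHCLB"[q] / "0123456789ABCDEFHLP"[r] ported as List.getD; the indices are provably in range, so the default is never used.
def get_err_code_py_alt (val : Int) : String :=
  if 1 ≤ val ∧ val ≤ 114 then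
    let q := PySem.Int.floordiv (val - 1) 19
    let r := PySem.Int.mod (val - 1) 19
    String.ofList [['E','P','H','C','L','B'].getD q.toNat 'E',
                   ['0','1','2','3','4','5','6','7','8','9','A','B','C','D','E','F','H','L','P'].getD r.toNat '0']
  else "None"

-- ===== PRECONDITION & SPEC =====
def Spec_get_err_code_py (val : Int) (out : String) : Prop := out = get_err_code_py_alt val
instance (val : Int) (out : String) : Decidable (Spec_get_err_code_py val out) := by unfold Spec_get_err_code_py; infer_instance

-- ===== CLAIM (what is proved, stated in full; the proofs are below) =====
def Claim_equal_get_err_code_py : Prop := ∀ (val : Int), Dom_get_err_code_py val → Spec_get_err_code_py val (get_err_code_py val)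

-- ===== LEMMAS AND PROOFS =====

-- decimal writer: the value of Nat.toDigits 10 without fuel
def decChars (n : Nat) : List Char :=
  if n < 10 then [Nat.digitChar n]
  else decChars (n / 10) ++ [Nat.digitChar (n % 10)]
decreasing_by exact Nat.div_lt_self (by omega) (by omega)

theorem decChars_small {n : Nat} (h : n < 10) : decChars n = [Nat.digitChar n] := by
  rw [decChars]; simp [h]

theorem decChars_big {n : Nat} (h : ¬ n < 10) :
    decChars n = decChars (n / 10) ++ [Nat.digitChar (n % 10)] := by
  rw [decChars]; simp [h]

theorem toDigitsCore_eq_decChars : ∀ (f n : Nat) (l : List Char), n < f →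
    Nat.toDigitsCore 10 f n l = decChars n ++ l := by
  intro f
  induction f with
  | zero => intro n l h; omega
  | succ f ih =>
    intro n l h
    by_cases h10 : n < 10
    · have hd : n / 10 = 0 := Nat.div_eq_of_lt h10
      have hm : n % 10 = n := Nat.mod_eq_of_lt h10
      simp [Nat.toDigitsCore, hd, hm, decChars_small h10]
    · have hd : n / 10 ≠ 0 := by omega
      have hlt : n / 10 < f := by
        have := Nat.div_lt_self (by omega : 0 < n) (by omega : 1 < 10)
        omega
      simp only [Nat.toDigitsCore, hd, if_false]
      rw [ih (n / 10) _ hlt, decChars_big h10]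
      simp

theorem toDigits_eq_decChars (n : Nat) : Nat.toDigits 10 n = decChars n := by
  have := toDigitsCore_eq_decChars (n + 1) n [] (by omega)
  simpa [Nat.toDigits] using this

theorem digitChar_inj {a b : Nat} (ha : a < 10) (hb : b < 10)
    (h : Nat.digitChar a = Nat.digitChar b) : a = b := by
  interval_cases a <;> interval_cases b <;> simp_all [Nat.digitChar]

theorem decChars_ne_nil (n : Nat) : decChars n ≠ [] := by
  by_cases h : n < 10
  · rw [decChars_small h]; simp
  · rw [decChars_big h]; simp

theorem neg_not_mem_decChars (n : Nat) : '-' ∉ decChars n := by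
  induction n using Nat.strong_induction_on with
  | _ n ih =>
    by_cases h : n < 10
    · rw [decChars_small h]
      have hd : Nat.digitChar n ≠ '-' := by interval_cases n <;> decide
      simp only [List.mem_singleton]
      exact fun he => hd he.symm
    · rw [decChars_big h]
      intro hmem
      rcases List.mem_append.mp hmem with h1 | h2
      · exact ih (n / 10) (Nat.div_lt_self (by omega) (by omega)) h1
      · have hlt : n % 10 < 10 := Nat.mod_lt _ (by omega)
        have hd : Nat.digitChar (n % 10) ≠ '-' := by interval_cases (n % 10) <;> decide
        simp only [List.mem_singleton] at h2
        exact hd h2.symm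

theorem decChars_inj : ∀ (m n : Nat), decChars m = decChars n → m = n := by
  intro m
  induction m using Nat.strong_induction_on with
  | _ m ih =>
    intro n h
    by_cases hm : m < 10 <;> by_cases hn : n < 10
    · rw [decChars_small hm, decChars_small hn] at h
      exact digitChar_inj hm hn (List.singleton_inj.mp h)
    · rw [decChars_small hm, decChars_big hn] at h
      exfalso
      have hne := decChars_ne_nil (n / 10)
      have hl := congrArg List.length h
      simp only [List.length_append, List.length_singleton] at hl
      have : decChars (n / 10) = [] := List.length_eq_zero_iff.mp (by omega)
      exact hne this
    · rw [decChars_big hm, decChars_small hn] at h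
      exfalso
      have hne := decChars_ne_nil (m / 10)
      have hl := congrArg List.length h
      simp only [List.length_append, List.length_singleton] at hl
      have : decChars (m / 10) = [] := List.length_eq_zero_iff.mp (by omega)
      exact hne this
    · rw [decChars_big hm, decChars_big hn] at h
      have h' := congrArg List.reverse h
      simp at h'
      have hdig : Nat.digitChar (m % 10) = Nat.digitChar (n % 10) := h'.1
      have htail : decChars (m / 10) = decChars (n / 10) := h'.2
      have hmod : m % 10 = n % 10 :=
        digitChar_inj (Nat.mod_lt _ (by omega)) (Nat.mod_lt _ (by omega)) hdig
      have hdiv : m / 10 = n / 10 :=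
        ih (m / 10) (Nat.div_lt_self (by omega) (by omega)) _ htail
      omega

theorem toStr_inj {a b : Int} (h : PySem.Int.toStr a = PySem.Int.toStr b) : a = b := by
  have hl : PySem.Int.toChars a = PySem.Int.toChars b := by
    have := congrArg String.toList h
    simpa [PySem.Int.toList_toStr] using this
  unfold PySem.Int.toChars at hl
  by_cases ha : a < 0 <;> by_cases hb : b < 0 <;> simp [ha, hb] at hl
  · rw [toDigits_eq_decChars, toDigits_eq_decChars] at hl
    have := decChars_inj _ _ hl
    omega
  · exfalso
    rw [toDigits_eq_decChars, toDigits_eq_decChars] at hl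
    have : '-' ∈ decChars b.toNat := by rw [← hl]; simp
    exact neg_not_mem_decChars _ this
  · exfalso
    rw [toDigits_eq_decChars, toDigits_eq_decChars] at hl
    have : '-' ∈ decChars a.toNat := by rw [hl]; simp
    exact neg_not_mem_decChars _ this
  · rw [toDigits_eq_decChars, toDigits_eq_decChars] at hl
    have := decChars_inj _ _ hl
    omega

set_option maxRecDepth 8192 in
theorem errDict_keys : errDict.keys = (PySem.List.pyRange 1 115 1).map PySem.Int.toStr := by
  decide

theorem miss_case {val : Int} (h : ¬ (1 ≤ val ∧ val ≤ 114)) :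
    errDict.getD (PySem.Int.toStr val) "None" = "None" := by
  apply PySem.Dict.getD_of_not_contains
  rw [PySem.Dict.contains_eq_decide_mem_keys, errDict_keys]
  simp only [decide_eq_false_iff_not, List.mem_map]
  rintro ⟨k, hk, hkey⟩
  have hk' := (PySem.List.mem_pyRange_one).mp hk
  have := toStr_inj hkey.symm
  omega

-- ===== VERDICT (by name: the statement is the Claim_ definition above) =====
set_option maxRecDepth 8192 in
theorem get_err_code_py_spec : Claim_equal_get_err_code_py := by
  intro val _
  unfold Spec_get_err_code_py
  by_cases h : 1 ≤ val ∧ val ≤ 114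
  · obtain ⟨h1, h2⟩ := h
    interval_cases val <;> decide
  · unfold get_err_code_py
    rw [miss_case h]
    unfold get_err_code_py_alt
    simp [h]
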